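-- pv_equiv track=rewrite | github.com/shawkridge/athena | src/athena/working_memory/consolidation_router_v2.py | _has_temporal_markers
-- ===== SOURCE A (Python) =====
-- def _has_temporal_markers(content: str) -> bool:
--     """Check for temporal indicators."""
--
--     temporal_words = [
--         "yesterday",
--         "today",
--         "tomorrow",
--         "week",
--         "month",
--         "year",
--         "morning",
--         "afternoon",
--         "evening",
--         "night",
--         "when",
--         "then",
--         "after",
--         "before",
--         "during",
--     ]
--     return any(word in content.lower() for word in temporal_words)
-- ===== SOURCE B (Python) =====
-- TEMPORAL_WORDS = (
--     "yesterday", "today", "tomorrow", "week", "month", "year",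
--     "morning", "afternoon", "evening", "night", "when", "then",
--     "after", "before", "during",
-- )
--
--
-- def _has_temporal_markers(content: str) -> bool:
--     """Single left-to-right scan: at each position, does some temporal word start here?"""
--     s = content.lower()
--     for i in range(len(s) + 1):
--         for w in TEMPORAL_WORDS:
--             if s.startswith(w, i):
--                 return True
--     return False
-- ===== Notes on version B (the rewrite author's own statement) =====
-- stated objective: alternative
-- what changed: A tests each word with a substring search over the whole string (word-major); B makes one position-major scan of the lowercased content, checking at each index whether any temporal word is a prefix there, returning at the first match.
import Mathlib
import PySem

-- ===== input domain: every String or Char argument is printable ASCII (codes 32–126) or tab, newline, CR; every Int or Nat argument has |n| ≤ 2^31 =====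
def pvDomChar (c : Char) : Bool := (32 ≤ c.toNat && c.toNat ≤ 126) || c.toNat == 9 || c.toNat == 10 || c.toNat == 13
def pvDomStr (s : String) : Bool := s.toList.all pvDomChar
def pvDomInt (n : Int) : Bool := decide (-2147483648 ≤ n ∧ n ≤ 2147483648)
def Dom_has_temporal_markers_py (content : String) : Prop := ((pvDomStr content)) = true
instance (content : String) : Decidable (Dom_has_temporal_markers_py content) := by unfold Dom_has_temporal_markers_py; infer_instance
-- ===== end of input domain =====

-- B replaces A's word-major per-word substring searches by one position-major scan of the
-- lowercased content, testing at each index whether some temporal word starts there (alternative).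

-- ===== PORT A =====
def temporalWordsA : List String :=
  ["yesterday", "today", "tomorrow", "week", "month", "year",
   "morning", "afternoon", "evening", "night", "when", "then",
   "after", "before", "during"]

def has_temporal_markers_py (content : String) : Bool :=
  temporalWordsA.any (fun w => PySem.Str.isIn w (PySem.Str.lower content))

-- ===== PORT B =====
def temporalWordsB : List (List Char) :=
  (["yesterday", "today", "tomorrow", "week", "month", "year",
    "morning", "afternoon", "evening", "night", "when", "then",
    "after", "before", "during"] : List String).map String.toList

-- the scan: at each position (suffix), does some word start here?  (Source B's startswith(w, i) loop)
def scanTemporal (words : List (List Char)) : List Char → Bool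
  | [] => words.any (fun w => w.isPrefixOf ([] : List Char))
  | c :: cs => words.any (fun w => w.isPrefixOf (c :: cs)) || scanTemporal words cs

def has_temporal_markers_py_alt (content : String) : Bool :=
  scanTemporal temporalWordsB (PySem.Chars.lower content.toList)

-- ===== PRECONDITION & SPEC =====
def Spec_has_temporal_markers_py (content : String) (out : Bool) : Prop := out = has_temporal_markers_py_alt content
instance (content : String) (out : Bool) : Decidable (Spec_has_temporal_markers_py content out) := by unfold Spec_has_temporal_markers_py; infer_instance

-- ===== CLAIM (what is proved, stated in full; the proofs are below) =====
def Claim_equal_has_temporal_markers_py : Prop := ∀ (content : String), Dom_has_temporal_markers_py content → Spec_has_temporal_markers_py content (has_temporal_markers_py content)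

-- ===== LEMMAS AND PROOFS =====

-- the scan finds a word iff some word of the list is an infix
theorem scanTemporal_iff_infix (words : List (List Char)) (l : List Char) :
    scanTemporal words l = true ↔ ∃ w ∈ words, w <:+: l := by
  induction l with
  | nil =>
      simp [scanTemporal, List.isPrefixOf_iff_prefix]
  | cons c cs ih =>
      simp [scanTemporal, List.any_eq_true, List.isPrefixOf_iff_prefix, ih,
        List.infix_cons_iff]
      constructor
      · rintro (⟨w, hw, h⟩ | ⟨w, hw, h⟩)
        · exact ⟨w, hw, Or.inl h⟩
        · exact ⟨w, hw, Or.inr h⟩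
      · rintro ⟨w, hw, h | h⟩
        · exact Or.inl ⟨w, hw, h⟩
        · exact Or.inr ⟨w, hw, h⟩

theorem temporalWords_toList : temporalWordsB = temporalWordsA.map String.toList := rfl

-- ===== VERDICT (by name: the statement is the Claim_ definition above) =====
theorem has_temporal_markers_py_spec : Claim_equal_has_temporal_markers_py := by
  intro content _
  show has_temporal_markers_py content = has_temporal_markers_py_alt content
  have hiff : has_temporal_markers_py content = true ↔
      has_temporal_markers_py_alt content = true := by
    rw [has_temporal_markers_py, has_temporal_markers_py_alt,
      scanTemporal_iff_infix, temporalWords_toList, List.any_eq_true]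
    constructor
    · rintro ⟨w, hw, h⟩
      refine ⟨w.toList, List.mem_map_of_mem hw, ?_⟩
      rw [← PySem.Str.toList_lower]
      exact (PySem.Str.isIn_iff_infix w _).mp h
    · rintro ⟨wl, hwl, h⟩
      obtain ⟨w, hw, rfl⟩ := List.mem_map.mp hwl
      refine ⟨w, hw, (PySem.Str.isIn_iff_infix w _).mpr ?_⟩
      rwa [PySem.Str.toList_lower]
  cases hA : has_temporal_markers_py content <;>
  cases hB : has_temporal_markers_py_alt content <;> simp_all
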